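-- pv_equiv track=rewrite | github.com/ohhyungyu/struct_extracter | module/XnuSrcToStruct.py | merge_backslash_lines
-- ===== SOURCE A (Python) =====
-- def merge_backslash_lines(code: str) -> str:
--     """
--     백슬래시(\\)로 줄이 이어진 경우 다음 줄과 합쳐 하나의 논리적인 코드 라인으로 만든다.
--     (예: 매크로 정의에서 \\ 로 줄을 바꾼 경우 등)
--     """
--     merged = []
--     i = 0
--     n = len(code)
--     while i < n:
--         if code[i] == '\\':
--             # 현재 문자가 '\'이고 다음 문자가 줄바꿈이라면 둘 다 건너뛰어 다음 줄과 연결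
--             if i + 1 < n and code[i+1] == '\n':
--                 i += 2
--                 continue
--             if i + 2 < n and code[i+1] == '\r' and code[i+2] == '\n':  # CRLF 지원
--                 i += 3
--                 continue
--             # '\' 뒤에 바로 개행이 없다면 일반 문자로 처리
--             merged.append(code[i])
--             i += 1
--         else:
--             merged.append(code[i])
--             if code[i] == '\n':
--                 # 줄바꿈은 그대로 추가 (백슬래시로 이은 경우는 위에서 처리됨)
--                 pass
--             i += 1
--     return ''.join(merged)
-- ===== SOURCE B (Python) =====
-- def merge_backslash_lines(code: str) -> str:
--     # Split into '\n'-separated segments and fold them back: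
--     # a segment ending in '\' (or '\'+'\r') continues onto the next line,
--     # so the backslash (and CR) and the newline are dropped; the last
--     # segment is emitted verbatim.
--     segs = code.split('\n')
--     out = []
--     last = len(segs) - 1
--     for idx, seg in enumerate(segs):
--         if idx == last:
--             out.append(seg)
--         elif seg.endswith('\\\r'):
--             out.append(seg[:-2])
--         elif seg.endswith('\\'):
--             out.append(seg[:-1])
--         else:
--             out.append(seg + '\n')
--     return ''.join(out)
-- ===== Notes on version B (the rewrite author's own statement) =====
-- stated objective: faster
-- what changed: Replaces the character-by-character while loop with manual index skips by splitting the input into newline-separated segments and joining them back, stripping the continuation backslash (and a preceding CR) from the end of each non-final segment.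
import Mathlib
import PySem

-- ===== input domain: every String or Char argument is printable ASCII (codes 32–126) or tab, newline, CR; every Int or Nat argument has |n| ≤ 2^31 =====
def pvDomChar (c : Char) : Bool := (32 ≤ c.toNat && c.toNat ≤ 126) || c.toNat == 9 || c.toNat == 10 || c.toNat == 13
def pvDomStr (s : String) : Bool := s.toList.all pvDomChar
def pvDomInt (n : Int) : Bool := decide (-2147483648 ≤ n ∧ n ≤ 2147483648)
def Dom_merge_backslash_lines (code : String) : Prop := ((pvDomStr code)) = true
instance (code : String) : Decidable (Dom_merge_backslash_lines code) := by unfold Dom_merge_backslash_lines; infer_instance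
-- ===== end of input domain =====

-- B replaces A's char-by-char while loop by splitting on newlines and joining the
-- segments back, stripping continuation backslashes; objective: faster (measured).

-- ===== PORT A =====
-- A's while loop over the character indices, as structural recursion:
-- '\'+'\n' skipped, '\'+'\r'+'\n' skipped, every other character appended.
def mergeA : List Char → List Char
  | [] => []
  | '\\' :: '\n' :: rest => mergeA rest
  | '\\' :: '\r' :: '\n' :: rest => mergeA rest
  | c :: rest => c :: mergeA rest

def merge_backslash_lines (code : String) : String :=
  String.ofList (mergeA code.toList)

-- ===== PORT B =====
-- B's per-segment transform: a segment that is not the last one either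
-- continues (trailing '\'+CR or trailing '\') or gets its '\n' back.
def pvSeg (s : List Char) : List Char :=
  if PySem.Chars.endswith s ['\\', '\r'] then s.dropLast.dropLast
  else if PySem.Chars.endswith s ['\\'] then s.dropLast
  else s ++ ['\n']

-- B's indexed loop: every segment but the last through pvSeg, the last verbatim.
def pvJoinSegs : List (List Char) → List Char
  | [] => []
  | [s] => s
  | s :: rest => pvSeg s ++ pvJoinSegs rest

def merge_backslash_lines_alt (code : String) : String :=
  String.ofList (pvJoinSegs (code.toList.splitOn '\n'))

-- ===== PRECONDITION & SPEC =====
def Spec_merge_backslash_lines (code : String) (out : String) : Prop := out = merge_backslash_lines_alt code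
instance (code : String) (out : String) : Decidable (Spec_merge_backslash_lines code out) := by unfold Spec_merge_backslash_lines; infer_instance

-- ===== CLAIM (what is proved, stated in full; the proofs are below) =====
def Claim_equal_merge_backslash_lines : Prop := ∀ (code : String), Dom_merge_backslash_lines code → Spec_merge_backslash_lines code (merge_backslash_lines code)

-- ===== LEMMAS AND PROOFS =====

theorem splitOn_nil_char : ([] : List Char).splitOn '\n' = [[]] := by
  simp [List.splitOn]

theorem splitOn_cons_nl (r : List Char) : ('\n'::r).splitOn '\n' = [] :: r.splitOn '\n' := by
  simp [List.splitOn, List.splitOnP_cons]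

theorem splitOn_cons_ne (c : Char) (r : List Char) (h : c ≠ '\n') :
    (c::r).splitOn '\n' = (r.splitOn '\n').modifyHead (List.cons c) := by
  simp [List.splitOn, List.splitOnP_cons, h]

theorem splitOn_ne_nil (r : List Char) : r.splitOn '\n' ≠ [] := by
  induction r with
  | nil => simp [List.splitOn]
  | cons c r ih =>
    by_cases h : c = '\n'
    · subst h; simp [splitOn_cons_nl]
    · rw [splitOn_cons_ne c r h]
      cases hr : r.splitOn '\n' with
      | nil => exact absurd hr ih
      | cons s t => simp

-- the head of a ≥2-element split, followed by '\n', is a prefix of the input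
theorem splitOn_head_prefix (r : List Char) (s : List Char) (x : List Char) (xs : List (List Char))
    (h : r.splitOn '\n' = s :: x :: xs) : s ++ ['\n'] <+: r := by
  induction r generalizing s x xs with
  | nil => rw [splitOn_nil_char] at h; simp at h
  | cons c r ih =>
    by_cases hc : c = '\n'
    · subst hc; rw [splitOn_cons_nl] at h
      injection h with h1 h2
      subst h1; simp
    · rw [splitOn_cons_ne c r hc] at h
      cases hr : r.splitOn '\n' with
      | nil => exact absurd hr (splitOn_ne_nil r)
      | cons s' t =>
        rw [hr] at h
        simp only [List.modifyHead] at h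
        injection h with h1 h2
        cases t with
        | nil => exact absurd h2 (by simp)
        | cons x' xs' =>
          have hp := ih s' x' xs' (by rw [hr, h2])
          rw [← h1, List.cons_append]
          exact List.cons_prefix_cons.mpr ⟨rfl, hp⟩

theorem endswith_cons_of_lt (c : Char) (s p : List Char) (hlen : p.length < s.length + 1) :
    PySem.Chars.endswith (c::s) p = PySem.Chars.endswith s p := by
  by_cases hp : p <:+ s
  · rw [(PySem.Chars.endswith_iff s p).2 hp,
      (PySem.Chars.endswith_iff (c::s) p).2 (hp.trans (List.suffix_cons c s))]
  · have h1 : PySem.Chars.endswith s p = false := by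
      rw [Bool.eq_false_iff]
      exact fun hx => hp ((PySem.Chars.endswith_iff s p).1 hx)
    have h2 : PySem.Chars.endswith (c::s) p = false := by
      rw [Bool.eq_false_iff]; intro hx
      rcases List.suffix_cons_iff.1 ((PySem.Chars.endswith_iff _ _).1 hx) with h3 | h3
      · rw [h3] at hlen; simp at hlen
      · exact hp h3
    rw [h1, h2]

theorem pvSeg_nil : pvSeg [] = ['\n'] := by decide

theorem pvSeg_cons (c : Char) (s : List Char)
    (h : c = '\\' → s ≠ [] ∧ s ≠ ['\r']) :
    pvSeg (c :: s) = c :: pvSeg s := by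
  match s with
  | [] =>
    have hc : c ≠ '\\' := fun hc => (h hc).1 rfl
    have e1 : PySem.Chars.endswith [c] ['\\', '\r'] = false := by
      rw [Bool.eq_false_iff]; intro hx
      have := List.IsSuffix.length_le ((PySem.Chars.endswith_iff _ _).1 hx)
      simp at this
    have e2 : PySem.Chars.endswith [c] ['\\'] = false := by
      rw [Bool.eq_false_iff]; intro hx
      rcases List.suffix_cons_iff.1 ((PySem.Chars.endswith_iff _ _).1 hx) with h3 | h3
      · exact hc (List.cons.inj h3).1.symm
      · simp at h3
    simp [pvSeg, e1, e2]
    decide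
  | [d] =>
    have e1 : PySem.Chars.endswith [c, d] ['\\', '\r'] = false := by
      rw [Bool.eq_false_iff]; intro hx
      have hsuf := (PySem.Chars.endswith_iff _ _).1 hx
      have heq : (['\\', '\r'] : List Char) = [c, d] :=
        List.IsSuffix.eq_of_length hsuf (by simp)
      injection heq with hc' htl
      injection htl with hd' _
      exact (h hc'.symm).2 (by rw [← hd'])
    have e1' : PySem.Chars.endswith [d] ['\\', '\r'] = false := by
      rw [Bool.eq_false_iff]; intro hx
      have := List.IsSuffix.length_le ((PySem.Chars.endswith_iff _ _).1 hx)
      simp at this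
    have e2 : PySem.Chars.endswith [c, d] ['\\'] = PySem.Chars.endswith [d] ['\\'] :=
      endswith_cons_of_lt c [d] ['\\'] (by simp)
    by_cases hd : PySem.Chars.endswith [d] ['\\'] = true
    · have hd' : d = '\\' := by
        rcases List.suffix_cons_iff.1 ((PySem.Chars.endswith_iff _ _).1 hd) with h3 | h3
        · exact (List.cons.inj h3).1.symm
        · simp at h3
      simp [pvSeg, e1, e1', e2, hd]
    · simp [pvSeg, e1, e1', e2, Bool.eq_false_iff.2 hd]
  | d1 :: d2 :: ds =>
    have e1 : PySem.Chars.endswith (c :: d1 :: d2 :: ds) ['\\', '\r']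
        = PySem.Chars.endswith (d1 :: d2 :: ds) ['\\', '\r'] :=
      endswith_cons_of_lt _ _ _ (by simp)
    have e2 : PySem.Chars.endswith (c :: d1 :: d2 :: ds) ['\\']
        = PySem.Chars.endswith (d1 :: d2 :: ds) ['\\'] :=
      endswith_cons_of_lt _ _ _ (by simp)
    have hne : (d2 :: ds : List Char) ≠ [] := by simp
    have hne2 : (d1 :: d2 :: ds : List Char).dropLast ≠ [] := by
      rw [List.dropLast_cons_of_ne_nil hne]; simp
    by_cases h1 : PySem.Chars.endswith (d1 :: d2 :: ds) ['\\', '\r'] = true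
    · simp [pvSeg, e1, h1,
        List.dropLast_cons_of_ne_nil (by simp : (d1 :: d2 :: ds : List Char) ≠ [])]
    · by_cases h2 : PySem.Chars.endswith (d1 :: d2 :: ds) ['\\'] = true
      · simp [pvSeg, e1, e2, Bool.eq_false_iff.2 h1, h2,
          List.dropLast_cons_of_ne_nil (by simp : (d1 :: d2 :: ds : List Char) ≠ [])]
      · simp [pvSeg, e1, e2, Bool.eq_false_iff.2 h1, Bool.eq_false_iff.2 h2]

theorem pvSeg_backslash : pvSeg ['\\'] = [] := by decide
theorem pvSeg_backslash_cr : pvSeg ['\\', '\r'] = [] := by decide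

theorem mergeA_eq (l : List Char) : mergeA l = pvJoinSegs (l.splitOn '\n') := by
  induction l using mergeA.induct with
  | case1 => simp [mergeA, pvJoinSegs]
  | case2 rest ih =>
    rw [mergeA, splitOn_cons_ne '\\' _ (by decide), splitOn_cons_nl]
    simp only [List.modifyHead]
    cases hr : rest.splitOn '\n' with
    | nil => exact absurd hr (splitOn_ne_nil rest)
    | cons s t =>
      rw [hr] at ih
      simp [pvJoinSegs, pvSeg_backslash, ih]
  | case3 rest ih =>
    rw [mergeA, splitOn_cons_ne '\\' _ (by decide), splitOn_cons_ne '\r' _ (by decide),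
      splitOn_cons_nl]
    simp only [List.modifyHead]
    cases hr : rest.splitOn '\n' with
    | nil => exact absurd hr (splitOn_ne_nil rest)
    | cons s t =>
      rw [hr] at ih
      simp [pvJoinSegs, pvSeg_backslash_cr, ih]
  | case4 c rest h1 h2 ih =>
    have heq : mergeA (c :: rest) = c :: mergeA rest := by
      rw [mergeA]
      exacts [h1, h2]
    rw [heq]
    by_cases hc : c = '\n'
    · subst hc
      rw [splitOn_cons_nl]
      cases hr : rest.splitOn '\n' with
      | nil => exact absurd hr (splitOn_ne_nil rest)
      | cons s t =>
        rw [hr] at ih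
        simp [pvJoinSegs, pvSeg_nil, ih]
    · rw [splitOn_cons_ne c _ hc]
      cases hr : rest.splitOn '\n' with
      | nil => exact absurd hr (splitOn_ne_nil rest)
      | cons s t =>
        rw [hr] at ih
        simp only [List.modifyHead]
        cases t with
        | nil => simp [pvJoinSegs, ih]
        | cons x xs =>
          have hpre : s ++ ['\n'] <+: rest := splitOn_head_prefix rest s x xs hr
          have hseg : pvSeg (c :: s) = c :: pvSeg s := by
            apply pvSeg_cons
            intro hcb
            constructor
            · rintro rfl
              obtain ⟨t', ht⟩ := hpre
              exact h1 t' hcb (by simpa using ht.symm)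
            · rintro rfl
              obtain ⟨t', ht⟩ := hpre
              exact h2 t' hcb (by simpa using ht.symm)
          simp [pvJoinSegs, hseg, ih]

theorem mergeA_mainB (code : String) :
    merge_backslash_lines code = merge_backslash_lines_alt code := by
  unfold merge_backslash_lines merge_backslash_lines_alt
  rw [mergeA_eq]

-- ===== VERDICT (by name: the statement is the Claim_ definition above) =====
theorem merge_backslash_lines_spec : Claim_equal_merge_backslash_lines := by
  intro code _
  unfold Spec_merge_backslash_lines
  exact mergeA_mainB code
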